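-- pv_equiv track=rewrite | github.com/fedest-py/abc-conjecture-checker | abc.py | radical
-- ===== SOURCE A (Python) =====
-- def is_prime(a):
--     # Initialize counter to count the number of multiples
--     counter = 0
--     #loop to count number of multiples up to the number itself
--     for number in range(1,a+1):
--         if a%number == 0:
--             counter += 1
--
--     #if the number ain't one and it has 2 multiples only, it is prime
--     if a>1 and counter == 2:
--         return True
--
-- def radical(a,b,c):
--     #turn arguments into a list, initialize an empty list for found primes, and another list to put the unique values
--     argument = [a,b,c]
--     primes = []
--     unique_primes = []
--     #double loop evaluates the multiples of the arguments and adds them to the primes list if prime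
--     for element in argument:
--         for number in range(1,element + 1):
--             if element%number == 0 and is_prime(number):
--                 primes.append(number)
--
--     #take into account only the unique values
--     for prime in primes:
--         if  prime not in unique_primes:
--             unique_primes.append(prime)
--     #multiply all the unique primes
--     answer = 1
--     for value in unique_primes:
--         answer *= value
--
--     return answer
-- ===== SOURCE B (Python) =====
-- def radical(a, b, c):
--     primes = set()
--     for x in (a, b, c):
--         n = x
--         d = 2
--         while d * d <= n:
--             if n % d == 0:
--                 primes.add(d)
--                 while n % d == 0:
--                     n //= d
--             d += 1
--         if n > 1:
--             primes.add(n)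
--     ans = 1
--     for p in primes:
--         ans *= p
--     return ans
-- ===== Notes on version B (the rewrite author's own statement) =====
-- stated objective: faster
-- what changed: B factors each argument by trial division up to sqrt(n), dividing found primes out and collecting them into a set, instead of A's scan of every number up to n with a divisor-counting primality test followed by a list dedup pass.
import Mathlib
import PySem

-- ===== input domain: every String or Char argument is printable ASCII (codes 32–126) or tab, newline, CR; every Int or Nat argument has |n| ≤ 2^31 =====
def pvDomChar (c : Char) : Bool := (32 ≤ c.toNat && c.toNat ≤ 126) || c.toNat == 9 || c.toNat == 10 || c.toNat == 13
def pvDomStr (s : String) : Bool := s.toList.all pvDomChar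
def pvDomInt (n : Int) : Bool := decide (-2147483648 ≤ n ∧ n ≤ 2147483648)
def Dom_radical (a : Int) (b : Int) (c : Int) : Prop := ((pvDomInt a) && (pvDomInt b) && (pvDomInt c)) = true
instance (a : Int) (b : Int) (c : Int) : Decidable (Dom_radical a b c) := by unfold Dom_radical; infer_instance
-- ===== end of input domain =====

-- B replaces A's full scan with a divisor-counting primality test by trial-division
-- factorization up to sqrt with divide-out, collecting the primes into a set (faster).


-- ===== PORT A =====
-- is_prime: counts the divisors of a in 1..a; Python returns True / None, used as a boolean.
def pvIsPrimeA (a : Int) : Bool :=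
  let counter : Int :=
    (PySem.List.pyRange 1 (a + 1)).foldl
      (fun counter number => if (PySem.Int.mod a number == 0) = true then counter + 1 else counter) 0
  decide (1 < a) && decide (counter = 2)

def radical (a : Int) (b : Int) (c : Int) : Int :=
  let argument : List Int := [a, b, c]
  let primes : List Int :=
    argument.foldl (fun ps element =>
      (PySem.List.pyRange 1 (element + 1)).foldl
        (fun ps number =>
          if ((PySem.Int.mod element number == 0) && pvIsPrimeA number) = true then ps ++ [number] else ps)
        ps) []
  let uniquePrimes : List Int :=
    primes.foldl (fun u p => if u.contains p then u else u ++ [p]) []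
  uniquePrimes.foldl (fun answer value => answer * value) 1

-- ===== PORT B =====
-- inner `while n % d == 0: n //= d` loop; structural recursion on a fuel bound
-- (n.toNat steps more than suffice: n strictly shrinks each iteration).
def pvDivOut : Nat → Int → Int → Int
  | 0, n, _ => n
  | fuel + 1, n, d =>
    if PySem.Int.mod n d = 0 then pvDivOut fuel (PySem.Int.floordiv n d) d else n

-- the `while d*d <= n` loop of B, with the set of collected primes as accumulator;
-- structural recursion on a fuel bound (d increases every iteration, so x.toNat + 1
-- steps more than suffice for the top-level call).
def pvFactorAux : Nat → Int → Int → PySem.Set Int → PySem.Set Int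
  | 0, _, _, acc => acc
  | fuel + 1, n, d, acc =>
    if d * d ≤ n then
      if PySem.Int.mod n d = 0 then
        pvFactorAux fuel (pvDivOut n.toNat n d) (d + 1) (PySem.Set.add acc d)
      else
        pvFactorAux fuel n (d + 1) acc
    else
      if 1 < n then PySem.Set.add acc n else acc

def radical_alt (a : Int) (b : Int) (c : Int) : Int :=
  let primes : PySem.Set Int :=
    [a, b, c].foldl (fun acc x => pvFactorAux (x.toNat + 1) x 2 acc) PySem.Set.empty
  primes.foldl (fun ans p => ans * p) 1

-- ===== PRECONDITION & SPEC =====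
def Spec_radical (a : Int) (b : Int) (c : Int) (out : Int) : Prop := out = radical_alt a b c
instance (a : Int) (b : Int) (c : Int) (out : Int) : Decidable (Spec_radical a b c out) := by unfold Spec_radical; infer_instance

-- ===== CLAIM (what is proved, stated in full; the proofs are below) =====
def Claim_equal_radical : Prop := ∀ (a : Int) (b : Int) (c : Int), Dom_radical a b c → Spec_radical a b c (radical a b c)

-- ===== LEMMAS AND PROOFS =====

-- "x is a prime divisor of X": 2 ≤ x, x ∣ X, and x has no divisor in [2, x).
def pvPD (X x : Int) : Prop := 2 ≤ x ∧ x ∣ X ∧ ∀ e : Int, 2 ≤ e → e < x → ¬ e ∣ x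

theorem pvDivOut_props (fuel : Nat) : ∀ n d : Int, 2 ≤ d → 1 ≤ n → n.toNat ≤ fuel →
    1 ≤ pvDivOut fuel n d ∧ pvDivOut fuel n d ≤ n ∧ ¬ d ∣ pvDivOut fuel n d ∧
      ∃ k : Nat, n = d ^ k * pvDivOut fuel n d := by
  induction fuel with
  | zero =>
    intro n d hd hn hf
    exact absurd hf (by omega)
  | succ f ih =>
    intro n d hd hn
    intro hf
    by_cases hm : PySem.Int.mod n d = 0
    · have hdvd : d ∣ n := (PySem.Int.mod_eq_zero_iff_dvd n d).mp hm
      have heq : PySem.Int.floordiv n d = n / d := PySem.Int.floordiv_eq_ediv_of_pos (by omega)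
      have hmul : d * (n / d) = n := Int.mul_ediv_cancel' hdvd
      have hq1 : 1 ≤ n / d := by nlinarith [Int.lt_or_le (n / d) 1]
      have hqlt : n / d < n := by nlinarith
      have hfu : (n / d).toNat ≤ f := by omega
      have hres : pvDivOut (f + 1) n d = pvDivOut f (n / d) d := by
        rw [pvDivOut, if_pos hm, heq]
      obtain ⟨h1, h2, h3, k, hk⟩ := ih (n / d) d hd hq1 hfu
      rw [hres]
      refine ⟨h1, le_trans h2 (by omega), h3, k + 1, ?_⟩
      calc n = d * (n / d) := hmul.symm
      _ = d * (d ^ k * pvDivOut f (n / d) d) := by rw [← hk]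
      _ = d ^ (k + 1) * pvDivOut f (n / d) d := by rw [pow_succ]; ring
    · rw [pvDivOut, if_neg hm]
      refine ⟨hn, le_refl n, ?_, 0, by ring⟩
      intro hdvd
      exact hm ((PySem.Int.mod_eq_zero_iff_dvd n d).mpr hdvd)

theorem pv_primeish_prime (p : Int) (hp2 : 2 ≤ p) (h : ∀ e : Int, 2 ≤ e → e < p → ¬ e ∣ p) :
    Prime p := by
  rw [Int.prime_iff_natAbs_prime, Nat.prime_def_lt]
  constructor
  · omega
  · intro m hm hdvd
    by_contra hm1
    have hm0 : m ≠ 0 := by rintro rfl; simp at hdvd; omega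
    have hmp : (m : Int) ∣ p := by
      rw [← Int.natAbs_dvd_natAbs]; simpa using hdvd
    exact h m (by omega) (by omega) hmp

-- if n has no divisor in [2, d) and n < d*d then n has no divisor in [2, n) at all
theorem pv_no_mid_div (n d : Int) (hd : 2 ≤ d) (hn : 2 ≤ n) (hlt : n < d * d)
    (hinv : ∀ e : Int, 2 ≤ e → e < d → ¬ e ∣ n) :
    ∀ e : Int, 2 ≤ e → e < n → ¬ e ∣ n := by
  intro e he hen hdvd
  obtain ⟨f, hf⟩ := hdvd
  have hf1 : 1 ≤ f := by nlinarith [Int.lt_or_le f 1]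
  have hf2 : 2 ≤ f := by
    rcases Int.lt_or_le f 2 with h2 | h2
    · exfalso; have : f = 1 := by omega
      subst this; omega
    · exact h2
  rcases Int.lt_or_le e d with hed | hed
  · exact hinv e he hed ⟨f, hf⟩
  · have hfd' : f < d := by nlinarith
    exact hinv f hf2 hfd' ⟨e, by rw [hf]; ring⟩

theorem pvFactorAux_mem (fuel : Nat) : ∀ (n d : Int) (acc : PySem.Set Int) (x : Int),
    2 ≤ d → 1 ≤ n → (∀ e : Int, 2 ≤ e → e < d → ¬ e ∣ n) → (n + 1 - d).toNat < fuel →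
    (x ∈ pvFactorAux fuel n d acc ↔ x ∈ acc ∨ pvPD n x) := by
  induction fuel with
  | zero =>
    intro n d acc x hd hn hinv hf
    exact absurd hf (by omega)
  | succ f ih =>
    intro n d acc x hd hn hinv hf
    by_cases hdd : d * d ≤ n
    · have hdlen : 2 * d ≤ d * d := by nlinarith
      by_cases hm : PySem.Int.mod n d = 0
      · have hdvd : d ∣ n := (PySem.Int.mod_eq_zero_iff_dvd n d).mp hm
        obtain ⟨hn'pos, hn'le, hnd, k, hk⟩ := pvDivOut_props n.toNat n d hd hn (le_refl _)
        have hn'dvd : pvDivOut n.toNat n d ∣ n := by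
          refine ⟨d ^ k, ?_⟩
          conv_lhs => rw [hk]
          ring
        have hinv' : ∀ e : Int, 2 ≤ e → e < d + 1 → ¬ e ∣ pvDivOut n.toNat n d := by
          intro e he hlt hdvd'
          rcases eq_or_lt_of_le (by omega : e ≤ d) with rfl | hlt'
          · exact hnd hdvd'
          · exact hinv e he hlt' (hdvd'.trans hn'dvd)
        have hPDd : pvPD n d := ⟨hd, hdvd, fun e he hlt hed => hinv e he hlt (hed.trans hdvd)⟩
        have hdprime : Prime d := pv_primeish_prime d hd hPDd.2.2
        have hkey : ∀ y : Int, pvPD n y ↔ (y = d ∨ pvPD (pvDivOut n.toNat n d) y) := by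
          intro y
          constructor
          · rintro ⟨hy2, hyn, hyp⟩
            by_cases hyd : y = d
            · exact Or.inl hyd
            · refine Or.inr ⟨hy2, ?_, hyp⟩
              have hyprime : Prime y := pv_primeish_prime y hy2 hyp
              rw [hk] at hyn
              rcases (Prime.dvd_mul hyprime).mp hyn with hpow | hgood
              · exfalso
                have hyd' : y ∣ d := hyprime.dvd_of_dvd_pow hpow
                have := (Int.prime_iff_natAbs_prime.mp hdprime).eq_one_or_self_of_dvd y.natAbs
                  (by rw [← Int.natAbs_dvd_natAbs] at hyd'; exact hyd')
                omega
              · exact hgood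
          · rintro (rfl | ⟨hy2, hyn', hyp⟩)
            · exact hPDd
            · exact ⟨hy2, hyn'.trans hn'dvd, hyp⟩
        rw [pvFactorAux, if_pos hdd, if_pos hm,
          ih _ _ _ x (by omega) hn'pos hinv' (by omega), PySem.Set.mem_add, hkey]
        tauto
      · have hinv' : ∀ e : Int, 2 ≤ e → e < d + 1 → ¬ e ∣ n := by
          intro e he hlt hdvd'
          rcases eq_or_lt_of_le (by omega : e ≤ d) with rfl | hlt'
          · exact hm ((PySem.Int.mod_eq_zero_iff_dvd n e).mpr hdvd')
          · exact hinv e he hlt' hdvd'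
        rw [pvFactorAux, if_pos hdd, if_neg hm]
        exact ih _ _ _ x (by omega) hn hinv' (by omega)
    · have hdn : n < d * d := not_le.mp hdd
      by_cases hn2 : 1 < n
      · have hnomid := pv_no_mid_div n d hd (by omega) hdn hinv
        have hkey : ∀ y : Int, pvPD n y ↔ y = n := by
          intro y
          constructor
          · rintro ⟨hy2, hyn, _⟩
            have hyle : y ≤ n := Int.le_of_dvd (by omega) hyn
            rcases eq_or_lt_of_le hyle with rfl | hlt'
            · rfl
            · exact absurd hyn (hnomid y hy2 hlt')
          · rintro rfl
            exact ⟨by omega, dvd_refl _, hnomid⟩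
        rw [pvFactorAux, if_neg hdd, if_pos hn2, PySem.Set.mem_add, hkey]
      · have hn1 : n = 1 := by omega
        rw [pvFactorAux, if_neg hdd, if_neg hn2]
        subst hn1
        constructor
        · exact Or.inl
        · rintro (hx | ⟨hx2, hxn, _⟩)
          · exact hx
          · exact absurd (Int.le_of_dvd one_pos hxn) (by omega)

theorem pvFactorAux_nodup (fuel : Nat) : ∀ (n d : Int) (acc : PySem.Set Int),
    acc.Nodup → (pvFactorAux fuel n d acc).Nodup := by
  induction fuel with
  | zero => intro n d acc ha; exact ha
  | succ f ih =>
    intro n d acc ha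
    rw [pvFactorAux]
    split_ifs with h1 h2 h3
    · exact ih _ _ _ (PySem.Set.nodup_add acc d ha)
    · exact ih _ _ _ ha
    · exact PySem.Set.nodup_add acc n ha
    · exact ha

theorem pvFactorAux_arg (X : Int) (acc : PySem.Set Int) (x : Int) :
    x ∈ pvFactorAux (X.toNat + 1) X 2 acc ↔ x ∈ acc ∨ (1 ≤ X ∧ pvPD X x) := by
  rcases Int.lt_or_le X 1 with hX | hX
  · have h0 : X.toNat = 0 := by omega
    rw [h0, pvFactorAux, if_neg (by omega), if_neg (by omega)]
    constructor
    · exact Or.inl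
    · rintro (hx | ⟨h1, _⟩)
      · exact hx
      · omega
  · rw [pvFactorAux_mem (X.toNat + 1) X 2 acc x (by omega) hX
      (by intro e he hlt; omega) (by omega)]
    constructor
    · rintro (hx | hpd)
      · exact Or.inl hx
      · exact Or.inr ⟨hX, hpd⟩
    · rintro (hx | ⟨_, hpd⟩)
      · exact Or.inl hx
      · exact Or.inr hpd

-- ===== A-side characterization =====
def pvFA (X : Int) : List Int :=
  (PySem.List.pyRange 1 (X + 1)).filter (fun n => (PySem.Int.mod X n == 0) && pvIsPrimeA n)

theorem pvIsPrimeA_iff (p : Int) :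
    pvIsPrimeA p = true ↔ (2 ≤ p ∧ ∀ e : Int, 2 ≤ e → e < p → ¬ e ∣ p) := by
  have hcnt :
      (PySem.List.pyRange 1 (p + 1)).foldl
        (fun counter number => if (PySem.Int.mod p number == 0) = true then counter + 1 else counter) (0 : Int)
      = ((PySem.List.pyRange 1 (p + 1)).countP (fun number => PySem.Int.mod p number == 0) : Int) := by
    rw [PySem.List.foldl_count_if]; ring
  unfold pvIsPrimeA
  rw [hcnt]
  simp only [Bool.and_eq_true, decide_eq_true_eq]
  set F := (PySem.List.pyRange 1 (p + 1)).filter (fun number => PySem.Int.mod p number == 0) with hF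
  have hFlen : (PySem.List.pyRange 1 (p + 1)).countP (fun number => PySem.Int.mod p number == 0) = F.length :=
    List.countP_eq_length_filter
  have hFnodup : F.Nodup := (PySem.List.nodup_pyRange_one 1 (p + 1)).filter _
  have hFmem : ∀ e : Int, e ∈ F ↔ 1 ≤ e ∧ e ≤ p ∧ e ∣ p := by
    intro e
    simp only [hF, List.mem_filter, PySem.List.mem_pyRange_one, beq_iff_eq,
      PySem.Int.mod_eq_zero_iff_dvd]
    constructor
    · rintro ⟨⟨h1, h2⟩, h3⟩; exact ⟨h1, by omega, h3⟩
    · rintro ⟨h1, h2, h3⟩; exact ⟨⟨h1, by omega⟩, h3⟩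
  constructor
  · rintro ⟨hp1, hc2⟩
    refine ⟨by omega, ?_⟩
    intro e he hep hdvd
    have hc2' : F.length = 2 := by rw [← hFlen]; exact_mod_cast hc2
    have h1F : (1 : Int) ∈ F := (hFmem 1).mpr ⟨le_refl 1, by omega, one_dvd p⟩
    have heF : e ∈ F := (hFmem e).mpr ⟨by omega, by omega, hdvd⟩
    have hpF : p ∈ F := (hFmem p).mpr ⟨by omega, le_refl p, dvd_refl p⟩
    have hsub : ({1, e, p} : Finset ℤ) ⊆ F.toFinset := by
      intro y hy
      simp only [Finset.mem_insert, Finset.mem_singleton] at hy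
      rw [List.mem_toFinset]
      rcases hy with rfl | rfl | rfl
      · exact h1F
      · exact heF
      · exact hpF
    have hcard3 : ({1, e, p} : Finset ℤ).card = 3 := by
      rw [Finset.card_insert_of_notMem (by simp; omega),
        Finset.card_insert_of_notMem (by simp; omega), Finset.card_singleton]
    have := Finset.card_le_card hsub
    rw [List.toFinset_card_of_nodup hFnodup, hcard3] at this
    omega
  · rintro ⟨hp2, hnomid⟩
    refine ⟨by omega, ?_⟩
    have hperm : F.Perm [1, p] := by
      rw [List.perm_ext_iff_of_nodup hFnodup (by simp; omega)]
      intro y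
      rw [hFmem y]
      simp only [List.mem_cons, List.mem_singleton, List.not_mem_nil, or_false]
      constructor
      · rintro ⟨hy1, hyp, hydvd⟩
        rcases eq_or_lt_of_le hy1 with h1 | h1
        · exact Or.inl h1.symm
        · rcases eq_or_lt_of_le hyp with h2 | h2
          · exact Or.inr h2
          · exact absurd hydvd (hnomid y (by omega) h2)
      · rintro (rfl | rfl)
        · exact ⟨le_refl 1, by omega, one_dvd _⟩
        · exact ⟨by omega, le_refl _, dvd_refl _⟩
    rw [show ((2:Int)) = ((2:Nat) : Int) from rfl]
    congr 1
    rw [hFlen, hperm.length_eq]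
    rfl

theorem pvFA_mem (X x : Int) : x ∈ pvFA X ↔ (1 ≤ X ∧ pvPD X x) := by
  simp only [pvFA, List.mem_filter, PySem.List.mem_pyRange_one, Bool.and_eq_true, beq_iff_eq,
    PySem.Int.mod_eq_zero_iff_dvd, pvIsPrimeA_iff, pvPD]
  constructor
  · rintro ⟨⟨h1, hlt⟩, hdvd, hp2, hnomid⟩
    exact ⟨by omega, hp2, hdvd, hnomid⟩
  · rintro ⟨hX, hx2, hdvd, hnomid⟩
    have hxle : x ≤ X := Int.le_of_dvd (by omega) hdvd
    exact ⟨⟨by omega, by omega⟩, hdvd, hx2, hnomid⟩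

-- ===== assembling both programs =====
theorem radical_eq (a b c : Int) :
    radical a b c = (PySem.Set.ofList (pvFA a ++ pvFA b ++ pvFA c)).foldl (fun answer value => answer * value) 1 := by
  unfold radical
  simp only [List.foldl]
  rw [PySem.List.foldl_append_if (fun number => (PySem.Int.mod a number == 0) && pvIsPrimeA number) (fun n => n),
    PySem.List.foldl_append_if (fun number => (PySem.Int.mod b number == 0) && pvIsPrimeA number) (fun n => n),
    PySem.List.foldl_append_if (fun number => (PySem.Int.mod c number == 0) && pvIsPrimeA number) (fun n => n)]
  rw [PySem.Set.ofList_eq_foldl]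
  simp only [List.map_id', List.nil_append, List.append_assoc]
  rfl

theorem radical_alt_eq (a b c : Int) :
    radical_alt a b c
      = (pvFactorAux (c.toNat + 1) c 2 (pvFactorAux (b.toNat + 1) b 2
          (pvFactorAux (a.toNat + 1) a 2 PySem.Set.empty))).foldl (fun ans p => ans * p) 1 := by
  simp only [radical_alt, List.foldl]

theorem radical_eq_alt (a b c : Int) : radical a b c = radical_alt a b c := by
  rw [radical_eq, radical_alt_eq]
  have hLAn : (PySem.Set.ofList (pvFA a ++ pvFA b ++ pvFA c)).Nodup := PySem.Set.nodup_ofList _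
  have hLBn : (pvFactorAux (c.toNat + 1) c 2 (pvFactorAux (b.toNat + 1) b 2
      (pvFactorAux (a.toNat + 1) a 2 PySem.Set.empty))).Nodup :=
    pvFactorAux_nodup _ _ _ _ (pvFactorAux_nodup _ _ _ _ (pvFactorAux_nodup _ _ _ _ List.nodup_nil))
  have hmem : ∀ x, x ∈ PySem.Set.ofList (pvFA a ++ pvFA b ++ pvFA c)
      ↔ x ∈ pvFactorAux (c.toNat + 1) c 2 (pvFactorAux (b.toNat + 1) b 2
          (pvFactorAux (a.toNat + 1) a 2 PySem.Set.empty)) := by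
    intro x
    rw [PySem.Set.mem_ofList, pvFactorAux_arg, pvFactorAux_arg, pvFactorAux_arg]
    simp only [List.mem_append, pvFA_mem]
    have : x ∈ PySem.Set.empty (α := Int) ↔ False := by
      simp [PySem.Set.empty]
    tauto
  have hperm := (List.perm_ext_iff_of_nodup hLAn hLBn).mpr hmem
  rw [← List.prod_eq_foldl, ← List.prod_eq_foldl]
  exact hperm.prod_eq

-- ===== VERDICT (by name: the statement is the Claim_ definition above) =====
theorem radical_spec : Claim_equal_radical := by
  intro a b c _
  unfold Spec_radical
  exact radical_eq_alt a b c
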